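-- pv_equiv track=rewrite | github.com/biffhero/check_mk | modules/snmp.py | is_hex_string
-- ===== SOURCE A (Python) =====
-- def is_hex_string(value):
--     # as far as I remember, snmpwalk puts a trailing space within
--     # the quotes in case of hex strings. So we require that space
--     # to be present in order make sure, we really deal with a hex string.
--     if value[-1] != ' ':
--         return False
--     hexdigits = "0123456789abcdefABCDEF"
--     n = 0
--     for x in value:
--         if n % 3 == 2:
--             if x != ' ':
--                 return False
--         else:
--             if x not in hexdigits:
--                 return False
--         n += 1
--     return True
-- ===== SOURCE B (Python) =====
-- def is_hex_string(value):
--     # Valid iff the string is a nonempty sequence of "HH " triplets.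
--     if not value or len(value) % 3 != 0:
--         return False
--     hexdigits = "0123456789abcdefABCDEF"
--     return all(value[i] in hexdigits
--                and value[i + 1] in hexdigits
--                and value[i + 2] == ' '
--                for i in range(0, len(value), 3))
-- ===== Notes on version B (the rewrite author's own statement) =====
-- stated objective: idiomatic
-- what changed: Replaced the per-character index-counter state machine with a length%3 check plus an all() over fixed 3-character chunks (two hex digits and a space), dropping the trailing-space pre-check as redundant for nonempty triplet-aligned input.
import Mathlib
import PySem

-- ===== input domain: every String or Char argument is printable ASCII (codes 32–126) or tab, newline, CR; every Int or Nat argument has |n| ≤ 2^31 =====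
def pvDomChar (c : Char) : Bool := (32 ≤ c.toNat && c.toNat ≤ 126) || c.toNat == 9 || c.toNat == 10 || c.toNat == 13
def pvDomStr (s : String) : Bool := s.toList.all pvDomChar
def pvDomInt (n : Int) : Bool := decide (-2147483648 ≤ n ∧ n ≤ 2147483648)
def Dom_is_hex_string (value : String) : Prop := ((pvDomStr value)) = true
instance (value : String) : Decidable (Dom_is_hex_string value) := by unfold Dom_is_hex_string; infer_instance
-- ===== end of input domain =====

-- B replaces A's per-character index-counter state machine with a length-multiple-of-3 check
-- plus validation of fixed 3-character chunks (two hex digits, a space): idiomatic, same cost.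


-- ===== PORT A =====
-- 'x not in hexdigits' on a 1-char x is exactly char membership in the digit list
def pvHexdigits : List Char := "0123456789abcdefABCDEF".toList

-- the 'for x in value' loop with counter n; early 'return False' = result false
def pvLoopA : List Char → Nat → Bool
  | [], _ => true
  | x :: xs, n =>
    if n % 3 == 2 then
      if x != ' ' then false else pvLoopA xs (n + 1)
    else
      if !(pvHexdigits.contains x) then false else pvLoopA xs (n + 1)

def is_hex_string (value : String) : Bool :=
  match PySem.Str.pyGet? value (-1) with
  | none => false   -- IndexError on empty value; excluded by Pre_
  | some c =>
    if c != ' ' then false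
    else pvLoopA value.toList 0

-- ===== PORT B =====
def pvIsHex (c : Char) : Bool := pvHexdigits.contains c

-- the all() over range(0, len, 3): consume the chars three at a time
def pvChunks3 : List Char → Bool
  | a :: b :: c :: rest => pvIsHex a && pvIsHex b && (c == ' ') && pvChunks3 rest
  | _ => true

def is_hex_string_alt (value : String) : Bool :=
  if value.toList.isEmpty || value.toList.length % 3 != 0 then false
  else pvChunks3 value.toList

-- ===== PRECONDITION & SPEC =====
-- Pre_ excludes only the empty string, on which A raises IndexError (value[-1]).
def Pre_is_hex_string (value : String) : Prop := value.toList ≠ []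
instance (value : String) : Decidable (Pre_is_hex_string value) := by unfold Pre_is_hex_string; infer_instance
def pvWitness_is_hex_string : String := "ab "

def Spec_is_hex_string (value : String) (out : Bool) : Prop := out = is_hex_string_alt value
instance (value : String) (out : Bool) : Decidable (Spec_is_hex_string value out) := by unfold Spec_is_hex_string; infer_instance

-- ===== CLAIM (what is proved, stated in full; the proofs are below) =====
def Claim_equal_is_hex_string : Prop := ∀ (value : String), Dom_is_hex_string value → Pre_is_hex_string value → Spec_is_hex_string value (is_hex_string value)

-- ===== LEMMAS AND PROOFS =====

-- A's counter only matters mod 3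
theorem pvLoopA_mod (l : List Char) : ∀ n m : Nat, n % 3 = m % 3 → pvLoopA l n = pvLoopA l m := by
  induction l with
  | nil => intro n m _; rfl
  | cons x xs ih =>
    intro n m h
    simp only [pvLoopA, h]
    have h' : (n + 1) % 3 = (m + 1) % 3 := by omega
    rw [ih (n + 1) (m + 1) h']

-- unrolling one triple of A's loop at a counter ≡ 0
theorem pvLoopA_triple (a b c : Char) (r : List Char) :
    pvLoopA (a :: b :: c :: r) 0 = (pvIsHex a && pvIsHex b && (c == ' ') && pvLoopA r 0) := by
  have h3 : pvLoopA r 3 = pvLoopA r 0 := pvLoopA_mod r 3 0 rfl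
  simp only [pvLoopA, pvIsHex, h3]
  norm_num
  cases hA : pvHexdigits.contains a <;> cases hB : pvHexdigits.contains b <;>
    cases hc : c == ' ' <;> simp_all

-- if a triplet-aligned nonempty string passes B's chunk check, it ends in a space
theorem pvChunks3_last : ∀ l : List Char, pvChunks3 l = true → l.length % 3 = 0 → l ≠ [] →
    l.getLast? = some ' ' := by
  intro l
  induction l using pvChunks3.induct with
  | case1 a b c rest ih =>
    intro h hlen _
    simp only [pvChunks3, Bool.and_eq_true, beq_iff_eq] at h
    obtain ⟨⟨⟨_, _⟩, hc⟩, hrest⟩ := h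
    cases hr : rest with
    | nil => subst hr; simp [hc]
    | cons y ys =>
      have : rest.length % 3 = 0 := by subst hr; simp at hlen ⊢; omega
      have hlast := ih hrest this (by simp [hr])
      rw [hr] at hlast
      simp [List.getLast?_cons_cons, hlast]
  | case2 l h =>
    intro _ hlen hne
    rcases l with _ | ⟨x, _ | ⟨y, _ | ⟨z, r⟩⟩⟩
    · exact absurd rfl hne
    · simp at hlen
    · simp at hlen
    · exact absurd rfl (h x y z r)

-- A's loop on a space-terminated string = triplet-alignment plus B's chunk check
theorem pvLoopA_eq_chunks : ∀ l : List Char, l.getLast? = some ' ' →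
    pvLoopA l 0 = (decide (l.length % 3 = 0) && pvChunks3 l) := by
  intro l
  induction l using pvChunks3.induct with
  | case1 a b c rest ih =>
    intro hlast
    rw [pvLoopA_triple]
    cases hr : rest with
    | nil =>
      subst hr
      simp [pvChunks3, pvLoopA]
    | cons y ys =>
      have hlast' : rest.getLast? = some ' ' := by
        rw [hr] at hlast ⊢; simpa [List.getLast?_cons_cons] using hlast
      rw [← hr] at *
      rw [ih hlast']
      have : (a :: b :: c :: rest).length % 3 = rest.length % 3 := by simp; omega
      rw [this]
      simp only [pvChunks3]
      cases pvIsHex a <;> cases pvIsHex b <;> cases (c == ' ') <;>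
        cases decide (rest.length % 3 = 0) <;> cases pvChunks3 rest <;> simp
  | case2 l h =>
    intro hlast
    rcases l with _ | ⟨x, _ | ⟨y, _ | ⟨z, r⟩⟩⟩
    · simp at hlast
    · have hx : x = ' ' := by simpa using hlast
      subst hx
      simp [pvLoopA, pvChunks3, pvHexdigits]
    · have hy : y = ' ' := by simpa using hlast
      subst hy
      simp only [pvLoopA, pvChunks3]
      norm_num
      cases hx : pvHexdigits.contains x <;> simp [pvHexdigits]
    · exact absurd rfl (h x y z r)

-- ===== VERDICT (by name: the statement is the Claim_ definition above) =====
theorem is_hex_string_spec : Claim_equal_is_hex_string := by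
  intro value _ hpre
  unfold Spec_is_hex_string is_hex_string is_hex_string_alt
  unfold Pre_is_hex_string at hpre
  have hget : PySem.Str.pyGet? value (-1) = value.toList.getLast? := by simp [pysem]
  rw [hget]
  have hemp : value.toList.isEmpty = false := by
    simpa [List.isEmpty_iff] using hpre
  cases hl : value.toList.getLast? with
  | none => exact absurd (List.getLast?_eq_none_iff.mp hl) hpre
  | some c =>
    show (if (c != ' ') = true then false else pvLoopA value.toList 0) =
      (if (value.toList.isEmpty || value.toList.length % 3 != 0) = true then false
       else pvChunks3 value.toList)
    rw [hemp]
    by_cases hc : c = ' '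
    · subst hc
      rw [pvLoopA_eq_chunks value.toList hl]
      by_cases hm : value.toList.length % 3 = 0
      · have h1 : (value.toList.length % 3 != 0) = false := by rw [hm]; rfl
        rw [h1, decide_eq_true (p := value.toList.length % 3 = 0) hm]
        simp
      · have h1 : (value.toList.length % 3 != 0) = true := by
          simp only [bne_iff_ne, ne_eq]
          exact hm
        rw [h1, decide_eq_false (p := value.toList.length % 3 = 0) hm]
        simp
    · have hcc : (c != ' ') = true := by simp [bne_iff_ne, hc]
      rw [hcc]
      by_cases hm : value.toList.length % 3 = 0
      · have h1 : (value.toList.length % 3 != 0) = false := by rw [hm]; rfl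
        have hfalse : pvChunks3 value.toList = false := by
          cases hch : pvChunks3 value.toList
          · rfl
          · have hlast := pvChunks3_last value.toList hch hm hpre
            rw [hl] at hlast
            exact absurd (Option.some.inj hlast) hc
        rw [h1, hfalse]
        simp
      · have h1 : (value.toList.length % 3 != 0) = true := by
          simp only [bne_iff_ne, ne_eq]
          exact hm
        rw [h1]
        simp
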